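-- pv_equiv track=rewrite | github.com/kokoben/CS271_project | main.py | getNewCodes
-- ===== SOURCE A (Python) =====
-- def getNewCodes(codes, guess, guessKeys):
--     newCodesList = []
--
--     for code in codes:
--         keys = []
--         keys = setKeyPegs(guess, code)
--         if keys == guessKeys:
--             newCodesList.append(code)
--
--     return newCodesList
--
-- def setKeyPegs(guess, answer):
--     tempGuess = []
--     tempAnswer = []
--     tempKeys = []
--     numPegs = len(guess)
--
--     for peg in guess:
--         tempGuess.append(peg)
--
--     for peg in answer:
--         tempAnswer.append(peg)
--
--     # add black key pegs.
--     for pos in range(numPegs):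
--         if (tempGuess[pos] == tempAnswer[pos]):
--             tempKeys.append('b')
--             tempGuess[pos] = None
--             tempAnswer[pos] = None
--
--     # add white key pegs.
--     for pos, peg in enumerate(tempGuess):
--         for pos2, peg2 in enumerate(tempAnswer):
--             if (peg == peg2) and (peg != None) and (peg2 != None):
--                 tempKeys.append('w')
--                 tempGuess[pos] = None
--                 tempAnswer[pos2] = None
--                 break       # break from inner loop
--     return tempKeys
-- ===== SOURCE B (Python) =====
-- def setKeyPegs(guess, answer):
--     blackPositions = [i for i in range(len(guess)) if guess[i] == answer[i]]
--     leftGuess = [guess[i] for i in range(len(guess)) if i not in blackPositions]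
--     leftAnswer = [answer[i] for i in range(len(answer)) if i not in blackPositions]
--     whites = sum(min(leftGuess.count(c), leftAnswer.count(c)) for c in set(leftGuess))
--     return ['b'] * len(blackPositions) + ['w'] * whites
--
--
-- def getNewCodes(codes, guess, guessKeys):
--     return [code for code in codes if setKeyPegs(guess, code) == guessKeys]
-- ===== Notes on version B (the rewrite author's own statement) =====
-- stated objective: simpler
-- what changed: setKeyPegs is rewritten without the None-sentinel mutation passes: it collects the black-matched positions in one pass, drops them from both lists, and counts whites as the multiset-intersection size (sum over colors of min counts) of the remaining pegs, returning ['b']*blacks + ['w']*whites; getNewCodes becomes a comprehension filter. Pre_ excludes inputs where some code is shorter than the guess, on which A raises IndexError.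
import Mathlib
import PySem

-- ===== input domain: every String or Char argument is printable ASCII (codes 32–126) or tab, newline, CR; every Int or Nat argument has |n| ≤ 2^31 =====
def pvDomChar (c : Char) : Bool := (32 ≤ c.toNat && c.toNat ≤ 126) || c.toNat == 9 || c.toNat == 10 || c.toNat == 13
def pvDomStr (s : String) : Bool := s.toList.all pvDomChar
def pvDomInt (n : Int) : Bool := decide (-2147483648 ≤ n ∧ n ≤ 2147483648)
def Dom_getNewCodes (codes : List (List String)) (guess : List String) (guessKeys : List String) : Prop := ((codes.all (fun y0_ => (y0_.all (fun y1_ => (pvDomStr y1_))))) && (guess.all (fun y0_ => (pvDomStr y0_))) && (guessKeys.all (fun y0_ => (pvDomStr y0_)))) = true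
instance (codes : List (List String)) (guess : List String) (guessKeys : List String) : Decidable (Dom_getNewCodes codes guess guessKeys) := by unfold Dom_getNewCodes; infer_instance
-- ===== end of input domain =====

-- B rewrites setKeyPegs without the None-sentinel mutation passes: collect black-matched
-- positions, drop them from both lists, whites = multiset-intersection size of what is left;
-- output is ['b']*blacks ++ ['w']*whites. Objective: simpler.

-- ===== PORT A =====
-- black-peg loop body: 'if tempGuess[pos] == tempAnswer[pos]: append b, None out both'
def blackStep (st : List (Option String) × List (Option String) × List String) (pos : Nat) :
    List (Option String) × List (Option String) × List String :=
  if st.1.getD pos none = st.2.1.getD pos none then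
    (st.1.set pos none, st.2.1.set pos none, st.2.2 ++ ["b"])
  else st

-- inner white loop: scan tempAnswer for the first matching non-None peg, break on hit
def findFirst (peg : Option String) : List (Option String) → Option Nat
  | [] => none
  | peg2 :: rest =>
      if peg == peg2 && peg.isSome && peg2.isSome then some 0
      else (findFirst peg rest).map (· + 1)

-- white-peg loop body ('tempGuess[pos] = None' only touches the already-consumed position)
def whiteStep (st : List (Option String) × List String) (peg : Option String) :
    List (Option String) × List String :=
  match findFirst peg st.1 with
  | some pos2 => (st.1.set pos2 none, st.2 ++ ["w"])
  | none => st

def setKeyPegsA (guess answer : List String) : List String :=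
  let s1 := (List.range guess.length).foldl blackStep (guess.map some, answer.map some, [])
  (s1.1.foldl whiteStep (s1.2.1, s1.2.2)).2

def getNewCodes (codes : List (List String)) (guess : List String) (guessKeys : List String) : List (List String) :=
  codes.foldl (fun newCodesList code =>
    if setKeyPegsA guess code = guessKeys then newCodesList ++ [code] else newCodesList) []

-- ===== PORT B =====
def setKeyPegsB (guess answer : List String) : List String :=
  let blackPositions := (List.range guess.length).filter
      (fun i => guess.getD i "" == answer.getD i "")
  let leftGuess := ((List.range guess.length).filter (fun i => !blackPositions.contains i)).map
      (fun i => guess.getD i "")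
  let leftAnswer := ((List.range answer.length).filter (fun i => !blackPositions.contains i)).map
      (fun i => answer.getD i "")
  let whites := (PySem.Set.ofList leftGuess).foldl
      (fun acc c => acc + min (leftGuess.count c) (leftAnswer.count c)) 0
  List.replicate blackPositions.length "b" ++ List.replicate whites "w"

def getNewCodes_alt (codes : List (List String)) (guess : List String) (guessKeys : List String) : List (List String) :=
  codes.filter (fun code => setKeyPegsB guess code == guessKeys)

-- ===== PRECONDITION & SPEC =====
-- Pre_ excludes inputs where some code is shorter than the guess: there A raises IndexError
-- (tempAnswer[pos] out of range in the black pass).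
def Pre_getNewCodes (codes : List (List String)) (guess : List String) (guessKeys : List String) : Prop :=
  ∀ code ∈ codes, guess.length ≤ code.length
instance (codes : List (List String)) (guess : List String) (guessKeys : List String) : Decidable (Pre_getNewCodes codes guess guessKeys) := by unfold Pre_getNewCodes; infer_instance

def pvWitness_getNewCodes : List (List String) × List String × List String :=
  ([["r", "g"], ["g", "r"], ["r", "r"]], ["r", "g"], ["w", "w"])

def Spec_getNewCodes (codes : List (List String)) (guess : List String) (guessKeys : List String) (out : List (List String)) : Prop := out = getNewCodes_alt codes guess guessKeys
instance (codes : List (List String)) (guess : List String) (guessKeys : List String) (out : List (List String)) : Decidable (Spec_getNewCodes codes guess guessKeys out) := by unfold Spec_getNewCodes; infer_instance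

-- ===== CLAIM (what is proved, stated in full; the proofs are below) =====
def Claim_equal_getNewCodes : Prop := ∀ (codes : List (List String)) (guess : List String) (guessKeys : List String), Dom_getNewCodes codes guess guessKeys → Pre_getNewCodes codes guess guessKeys → Spec_getNewCodes codes guess guessKeys (getNewCodes codes guess guessKeys)

-- ===== LEMMAS AND PROOFS =====

-- what the black pass leaves behind
def maskG (gs as : List String) : List (Option String) :=
  (gs.zip as).map (fun p => if p.1 = p.2 then none else some p.1)
def maskA (gs as : List String) : List (Option String) :=
  (gs.zip as).map (fun p => if p.1 = p.2 then none else some p.2) ++ (as.drop gs.length).map some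
def blacksN (gs as : List String) : Nat := ((gs.zip as).filter (fun p => p.1 == p.2)).length

-- the white pass as a recursion: final answer list and number of 'w' pegs
def whiteRun : List (Option String) → List (Option String) → List (Option String) × Nat
  | [], a => (a, 0)
  | peg :: gs, a =>
    match findFirst peg a with
    | some i => ((whiteRun gs (a.set i none)).1, (whiteRun gs (a.set i none)).2 + 1)
    | none => whiteRun gs a

-- multiset of non-None pegs
def M (l : List (Option String)) : Multiset String := ↑(l.filterMap id)

theorem blackStep_succ (x y : Option String) (g a : List (Option String)) (ks : List String) (p : Nat) :
    blackStep (x :: g, y :: a, ks) (p + 1) =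
      ((blackStep (g, a, ks) p).1.cons x, (blackStep (g, a, ks) p).2.1.cons y, (blackStep (g, a, ks) p).2.2) := by
  simp only [blackStep, List.getD_cons_succ, List.set_cons_succ]
  split <;> rfl

theorem blackFold_cons (l : List Nat) (x y : Option String) (g a : List (Option String)) (ks : List String) :
    l.foldl (fun st p => blackStep st (p + 1)) (x :: g, y :: a, ks) =
      ((l.foldl blackStep (g, a, ks)).1.cons x, (l.foldl blackStep (g, a, ks)).2.1.cons y,
        (l.foldl blackStep (g, a, ks)).2.2) := by
  induction l generalizing g a ks with
  | nil => rfl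
  | cons p t ih => simp only [List.foldl_cons, blackStep_succ, ih]

theorem blackLoop (gs : List String) : ∀ (as : List String) (ks : List String), gs.length ≤ as.length →
    (List.range gs.length).foldl blackStep (gs.map some, as.map some, ks)
      = (maskG gs as, maskA gs as, ks ++ List.replicate (blacksN gs as) "b") := by
  induction gs with
  | nil => intro as ks _; simp [maskG, maskA, blacksN]
  | cons g gs ih =>
    intro as ks h
    cases as with
    | nil => simp at h
    | cons a as =>
      have hlen : gs.length ≤ as.length := by simpa using h
      simp only [List.map_cons, List.length_cons, List.range_succ_eq_map, List.foldl_cons,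
        List.foldl_map, Nat.succ_eq_add_one]
      by_cases hga : g = a
      · subst hga
        have h0 : blackStep (some g :: gs.map some, some g :: as.map some, ks) 0
            = (none :: gs.map some, none :: as.map some, ks ++ ["b"]) := by
          simp [blackStep]
        rw [h0, blackFold_cons, ih as (ks ++ ["b"]) hlen]
        simp [maskG, maskA, blacksN, List.replicate_succ]
      · have h0 : blackStep (some g :: gs.map some, some a :: as.map some, ks) 0
            = (some g :: gs.map some, some a :: as.map some, ks) := by
          simp [blackStep, hga]
        rw [h0, blackFold_cons, ih as ks hlen]
        simp [maskG, maskA, blacksN, hga]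

theorem whiteLoop (gs : List (Option String)) : ∀ (a : List (Option String)) (ks : List String),
    gs.foldl whiteStep (a, ks) = ((whiteRun gs a).1, ks ++ List.replicate (whiteRun gs a).2 "w") := by
  induction gs with
  | nil => intro a ks; simp [whiteRun]
  | cons peg gs ih =>
    intro a ks
    simp only [List.foldl_cons, whiteStep, whiteRun]
    cases hf : findFirst peg a with
    | none => simp [ih]
    | some i => simp [ih, List.replicate_succ]

theorem findFirst_none (a : List (Option String)) : findFirst none a = none := by
  induction a with
  | nil => rfl
  | cons p t ih => simp [findFirst, ih]

theorem findFirst_cons (c : String) (p : Option String) (rest : List (Option String)) :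
    findFirst (some c) (p :: rest) =
      if p = some c then some 0 else (findFirst (some c) rest).map (· + 1) := by
  cases p with
  | none => simp [findFirst]
  | some d =>
    by_cases h : d = c
    · subst h; simp [findFirst]
    · simp [findFirst, h, Ne.symm h]

theorem findFirst_eq_none_iff (c : String) (a : List (Option String)) :
    findFirst (some c) a = none ↔ some c ∉ a := by
  induction a with
  | nil => simp [findFirst]
  | cons p rest ih =>
    rw [findFirst_cons]
    by_cases h : p = some c <;> simp [h, ih, eq_comm]

theorem mem_M_iff (c : String) (a : List (Option String)) : c ∈ M a ↔ some c ∈ a := by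
  simp [M]

theorem M_none_cons (l : List (Option String)) : M (none :: l) = M l := by simp [M]

theorem M_some_cons (d : String) (l : List (Option String)) : M (some d :: l) = d ::ₘ M l := by simp [M]

theorem M_set_erase (c : String) : ∀ (a : List (Option String)) (i : Nat),
    findFirst (some c) a = some i → M (a.set i none) = (M a).erase c := by
  intro a
  induction a with
  | nil => intro i h; simp [findFirst] at h
  | cons p rest ih =>
    intro i h
    rw [findFirst_cons] at h
    by_cases hp : p = some c
    · rw [if_pos hp] at h
      injection h with h
      subst h
      subst hp
      show M (none :: rest) = (M (some c :: rest)).erase c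
      rw [M_none_cons, M_some_cons, Multiset.erase_cons_head]
    · rw [if_neg hp] at h
      obtain ⟨j, hj, hji⟩ := Option.map_eq_some_iff.mp h
      subst hji
      cases p with
      | none =>
        show M (none :: rest.set j none) = (M (none :: rest)).erase c
        rw [M_none_cons, M_none_cons, ih j hj]
      | some d =>
        have hdc : d ≠ c := fun hh => hp (by rw [hh])
        show M (some d :: rest.set j none) = (M (some d :: rest)).erase c
        rw [M_some_cons, M_some_cons, ih j hj, Multiset.erase_cons_tail]
        exact hdc

theorem whiteRun_card (gs : List (Option String)) : ∀ (a : List (Option String)),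
    (whiteRun gs a).2 = Multiset.card (M gs ∩ M a) := by
  induction gs with
  | nil => intro a; simp [whiteRun, M]
  | cons peg gs ih =>
    intro a
    cases peg with
    | none =>
      simp only [whiteRun, findFirst_none, ih]
      have : M (none :: gs) = M gs := by simp [M]
      rw [this]
    | some c =>
      have hMg : M (some c :: gs) = c ::ₘ M gs := by simp [M]
      cases hf : findFirst (some c) a with
      | none =>
        have hmem : c ∉ M a := by
          rw [mem_M_iff]; exact (findFirst_eq_none_iff c a).mp hf
        simp only [whiteRun, hf, ih, hMg]
        rw [Multiset.cons_inter_of_neg _ hmem]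
      | some i =>
        have hmem : c ∈ M a := by
          rw [mem_M_iff]
          by_contra hc
          rw [← findFirst_eq_none_iff] at hc
          simp [hc] at hf
        simp only [whiteRun, hf, ih, hMg, M_set_erase c a i hf]
        rw [Multiset.cons_inter_of_pos _ hmem]
        simp

theorem fm_mask_fst (l : List (String × String)) :
    (l.map (fun p => if p.1 = p.2 then none else some p.1)).filterMap id
      = (l.filter (fun p => p.1 != p.2)).map Prod.fst := by
  induction l with
  | nil => rfl
  | cons p t ih => by_cases h : p.1 = p.2 <;> simp_all

theorem fm_mask_snd (l : List (String × String)) :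
    (l.map (fun p => if p.1 = p.2 then none else some p.2)).filterMap id
      = (l.filter (fun p => p.1 != p.2)).map Prod.snd := by
  induction l with
  | nil => rfl
  | cons p t ih => by_cases h : p.1 = p.2 <;> simp_all

theorem card_inter_eq_fold (rg ra : List String) :
    (PySem.Set.ofList rg).foldl (fun acc c => acc + min (rg.count c) (ra.count c)) 0
      = Multiset.card ((↑rg : Multiset String) ∩ ↑ra) := by
  rw [PySem.List.foldl_add_nat, ← List.sum_toFinset _ (PySem.Set.nodup_ofList rg), Nat.zero_add]
  have htf : (PySem.Set.ofList rg).toFinset = rg.toFinset := by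
    ext x; simp [PySem.Set.mem_ofList]
  rw [htf, ← Multiset.toFinset_sum_count_eq ((↑rg : Multiset String) ∩ ↑ra)]
  have hsub : ((↑rg : Multiset String) ∩ ↑ra).toFinset ⊆ rg.toFinset := by
    intro x hx
    simp only [Multiset.mem_toFinset, Multiset.mem_inter] at hx
    simpa [List.mem_toFinset] using hx.1
  rw [Finset.sum_subset hsub (fun x _ hx => Multiset.count_eq_zero.mpr
        (by simpa [Multiset.mem_toFinset] using hx))]
  exact Finset.sum_congr rfl fun c _ => by
    rw [Multiset.count_inter, Multiset.coe_count, Multiset.coe_count]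

theorem range_filter_eq_zip (gs : List String) : ∀ (as : List String), gs.length ≤ as.length →
    ((List.range gs.length).filter (fun i => gs.getD i "" == as.getD i "")).map
        (fun i => (gs.getD i "", as.getD i ""))
      = (gs.zip as).filter (fun p => p.1 == p.2) := by
  induction gs with
  | nil => intro as _; simp
  | cons g gs ih =>
    intro as h
    cases as with
    | nil => simp at h
    | cons a as =>
      have hlen : gs.length ≤ as.length := by simpa using h
      simp only [List.length_cons, List.range_succ_eq_map, List.filter_cons, List.filter_map,
        List.map_map, List.zip_cons_cons]
      by_cases hga : g = a
      · simp only [List.getD_cons_zero, hga, beq_self_eq_true, if_pos,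
          Function.comp_def, List.getD_cons_succ, List.map_cons]
        rw [← ih as hlen]
        simp [Function.comp_def]
      · have hb : (g == a) = false := by simp [hga]
        simp only [List.getD_cons_zero, hb, Bool.false_eq_true, if_neg, Function.comp_def,
          List.getD_cons_succ]
        rw [← ih as hlen]
        simp [Function.comp_def]

theorem range_filter_ne_zip (gs : List String) : ∀ (as : List String), gs.length ≤ as.length →
    ((List.range gs.length).filter (fun i => gs.getD i "" != as.getD i "")).map
        (fun i => (gs.getD i "", as.getD i ""))
      = (gs.zip as).filter (fun p => p.1 != p.2) := by
  induction gs with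
  | nil => intro as _; simp
  | cons g gs ih =>
    intro as h
    cases as with
    | nil => simp at h
    | cons a as =>
      have hlen : gs.length ≤ as.length := by simpa using h
      simp only [List.length_cons, List.range_succ_eq_map, List.filter_cons, List.filter_map,
        List.map_map, List.zip_cons_cons]
      by_cases hga : g = a
      · simp only [List.getD_cons_zero, hga, bne_self_eq_false, Bool.false_eq_true, if_neg,
          List.getD_cons_succ]
        rw [← ih as hlen]
        simp [Function.comp_def]
      · have hb : (g != a) = true := by simp [bne, hga]
        simp only [List.getD_cons_zero, hb, if_pos, Function.comp_def, List.getD_cons_succ,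
          List.map_cons]
        rw [← ih as hlen]
        simp [Function.comp_def, bne, hga]

-- blackPositions membership: contains i decides the positional match (for i < n), false beyond n
theorem contains_dec (l : List Nat) (i : Nat) : l.contains i = decide (i ∈ l) := by simp

theorem contains_blackpos (guess answer : List String) (i : Nat) (hi : i < guess.length) :
    (((List.range guess.length).filter
        (fun j => guess.getD j "" == answer.getD j "")).contains i)
      = (guess.getD i "" == answer.getD i "") := by
  rw [contains_dec]
  cases hp : (guess.getD i "" == answer.getD i "") with
  | true => exact decide_eq_true (List.mem_filter.mpr ⟨List.mem_range.mpr hi, hp⟩)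
  | false =>
    refine decide_eq_false (fun hm => ?_)
    have h2 := (List.mem_filter.mp hm).2
    rw [hp] at h2
    exact Bool.noConfusion h2

theorem contains_blackpos_ge (guess answer : List String) (i : Nat) (hi : guess.length ≤ i) :
    (((List.range guess.length).filter
        (fun j => guess.getD j "" == answer.getD j "")).contains i) = false := by
  rw [contains_dec]
  refine decide_eq_false (fun hm => ?_)
  have h2 := List.mem_range.mp (List.mem_filter.mp hm).1
  omega

-- generic: mapping getD over the full index range rebuilds the list
theorem map_getD_range (l : List String) :
    (List.range l.length).map (fun i => l.getD i "") = l := by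
  apply List.ext_getElem
  · simp
  · intro i h1 h2
    simp [List.getD_eq_getElem?_getD, List.getElem?_eq_getElem h2]

theorem map_getD_range' (l : List String) (n : Nat) :
    (List.range' n (l.length - n)).map (fun i => l.getD i "") = l.drop n := by
  rw [List.range'_eq_map_range, List.map_map]
  have hlen : (l.drop n).length = l.length - n := List.length_drop
  have : ∀ j, l.getD (n + j) "" = (l.drop n).getD j "" := by
    intro j
    simp [List.getD_eq_getElem?_getD, List.getElem?_drop]
  calc (List.range (l.length - n)).map ((fun i => l.getD i "") ∘ (fun i => n + i))
      = (List.range (l.drop n).length).map (fun j => (l.drop n).getD j "") := by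
        rw [hlen]; exact List.map_congr_left (fun j _ => this j)
    _ = l.drop n := map_getD_range (l.drop n)

theorem setKeyPegs_eq (guess answer : List String) (h : guess.length ≤ answer.length) :
    setKeyPegsA guess answer = setKeyPegsB guess answer := by
  have hMg : M (maskG guess answer)
      = ↑(((guess.zip answer).filter (fun p => p.1 != p.2)).map Prod.fst) := by
    unfold M maskG
    rw [fm_mask_fst]
  have hMa : M (maskA guess answer)
      = ↑(((guess.zip answer).filter (fun p => p.1 != p.2)).map Prod.snd
            ++ answer.drop guess.length) := by
    unfold M maskA
    rw [List.filterMap_append, fm_mask_snd]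
    congr 1
    simp
  have hblacks : ((List.range guess.length).filter
        (fun i => guess.getD i "" == answer.getD i "")).length
      = blacksN guess answer := by
    unfold blacksN
    rw [← range_filter_eq_zip guess answer h, List.length_map]
  -- bridge: B's "not a black position" filter = the positional inequality filter
  have hcongrG : (List.range guess.length).filter
        (fun i => !((List.range guess.length).filter
            (fun j => guess.getD j "" == answer.getD j "")).contains i)
      = (List.range guess.length).filter (fun i => guess.getD i "" != answer.getD i "") := by
    apply List.filter_congr
    intro i hi
    rw [contains_blackpos guess answer i (List.mem_range.mp hi)]
    rfl
  have hrg : ((List.range guess.length).filter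
        (fun i => !((List.range guess.length).filter
            (fun j => guess.getD j "" == answer.getD j "")).contains i)).map
          (fun i => guess.getD i "")
      = ((guess.zip answer).filter (fun p => p.1 != p.2)).map Prod.fst := by
    rw [hcongrG, ← range_filter_ne_zip guess answer h, List.map_map]
    simp [Function.comp_def]
  -- bridge for the answer side: split the index range at guess.length
  have hsplit : List.range answer.length
      = List.range guess.length ++ List.range' guess.length (answer.length - guess.length) := by
    obtain ⟨k, hk⟩ : ∃ k, answer.length = guess.length + k :=
      ⟨answer.length - guess.length, by omega⟩
    rw [List.range_eq_range', List.range_eq_range', hk, Nat.add_sub_cancel_left,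
      ← List.range'_append]
    norm_num
  have hra : ((List.range answer.length).filter
        (fun i => !((List.range guess.length).filter
            (fun j => guess.getD j "" == answer.getD j "")).contains i)).map
          (fun i => answer.getD i "")
      = ((guess.zip answer).filter (fun p => p.1 != p.2)).map Prod.snd
          ++ answer.drop guess.length := by
    rw [hsplit, List.filter_append, List.map_append]
    congr 1
    · rw [hcongrG, ← range_filter_ne_zip guess answer h, List.map_map]
      simp [Function.comp_def]
    · have htail : (List.range' guess.length (answer.length - guess.length)).filter
          (fun i => !((List.range guess.length).filter
              (fun j => guess.getD j "" == answer.getD j "")).contains i)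
        = List.range' guess.length (answer.length - guess.length) := by
        apply List.filter_eq_self.mpr
        intro i hi
        have hge : guess.length ≤ i := by
          have := List.mem_range'.mp hi
          omega
        rw [contains_blackpos_ge guess answer i hge]
        rfl
      rw [htail, map_getD_range' answer guess.length]
  simp only [setKeyPegsA, setKeyPegsB, blackLoop guess answer [] h, whiteLoop,
    List.nil_append, hblacks, hrg, hra]
  rw [whiteRun_card, hMg, hMa, ← card_inter_eq_fold]

-- ===== VERDICT (by name: the statement is the Claim_ definition above) =====
theorem getNewCodes_spec : Claim_equal_getNewCodes := by
  intro codes guess guessKeys _ hpre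
  unfold Spec_getNewCodes getNewCodes getNewCodes_alt
  rw [PySem.List.foldl_append_ite_eq_filter]
  rw [List.nil_append]
  apply List.filter_congr
  intro code hmem
  rw [setKeyPegs_eq guess code (hpre code hmem)]
  by_cases h : setKeyPegsB guess code = guessKeys <;> simp [h]
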